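-- pv_equiv track=rewrite | github.com/samruddhi0411/csv_processor | services/converter_logic.py | calculate_age_distribution
-- ===== SOURCE A (Python) =====
-- def calculate_age_distribution(ages):
--     """Calculates the age distribution percentage."""
--     total_count = len(ages)
--     if total_count == 0: return {}
--
--     # ... (Age counting logic) ...
--     count_less_20 = sum(1 for age in ages if age < 20)
--     count_20_to_40 = sum(1 for age in ages if 20 <= age <= 40)
--     count_40_to_60 = sum(1 for age in ages if 40 < age <= 60)
--     count_greater_60 = sum(1 for age in ages if age > 60)
--
--     def to_percent(count):
--         return f"{(count / total_count) * 100:.2f}%"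
--
--     return {
--         "< 20": to_percent(count_less_20),
--         "20 to 40": to_percent(count_20_to_40),
--         "40 to 60": to_percent(count_40_to_60),
--         "> 60": to_percent(count_greater_60),
--     }
-- ===== SOURCE B (Python) =====
-- def calculate_age_distribution(ages):
--     """Calculates the age distribution percentage (single pass)."""
--     total_count = len(ages)
--     if total_count == 0: return {}
--
--     count_less_20 = count_20_to_40 = count_40_to_60 = count_greater_60 = 0
--     for age in ages:
--         if age < 20:
--             count_less_20 += 1
--         elif age <= 40:
--             count_20_to_40 += 1
--         elif age <= 60:
--             count_40_to_60 += 1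
--         else:
--             count_greater_60 += 1
--
--     def to_percent(count):
--         return f"{(count / total_count) * 100:.2f}%"
--
--     return {
--         "< 20": to_percent(count_less_20),
--         "20 to 40": to_percent(count_20_to_40),
--         "40 to 60": to_percent(count_40_to_60),
--         "> 60": to_percent(count_greater_60),
--     }
-- ===== Notes on version B (the rewrite author's own statement) =====
-- stated objective: faster
-- what changed: Replaces A's four separate filtered generator-sum passes over ages with a single loop that classifies each age into one of four counters via an if/elif chain.
import Mathlib
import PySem

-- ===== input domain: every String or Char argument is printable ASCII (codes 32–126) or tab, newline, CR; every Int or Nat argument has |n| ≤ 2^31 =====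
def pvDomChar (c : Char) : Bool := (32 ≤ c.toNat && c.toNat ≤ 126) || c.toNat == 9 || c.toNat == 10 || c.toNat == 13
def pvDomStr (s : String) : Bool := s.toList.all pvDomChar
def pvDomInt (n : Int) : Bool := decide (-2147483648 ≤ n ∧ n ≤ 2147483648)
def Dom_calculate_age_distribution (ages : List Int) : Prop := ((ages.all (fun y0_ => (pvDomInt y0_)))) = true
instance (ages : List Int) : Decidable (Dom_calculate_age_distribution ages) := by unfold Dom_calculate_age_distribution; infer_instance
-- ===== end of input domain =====

-- B replaces A's four filtered generator-sum passes by a single classifying loop; return value only.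

-- ===== PORT A =====
-- shared helper: exact model of Python's `f"{(count / total) * 100:.2f}%"` on this domain:
-- `count / total` and `* 100` are IEEE-754 double operations (round-to-nearest, ties-to-even),
-- simulated exactly in rational arithmetic; `.2f` rounds the exact double value half-to-even.
-- round half to even of a rational, to an integer
def pvRhe (q : ℚ) : ℤ :=
  let f := ⌊q⌋
  let r := q - (f : ℚ)
  if r < 1/2 then f else if 1/2 < r then f + 1 else if f % 2 = 0 then f else f + 1

-- round a nonnegative rational to the nearest IEEE-754 double (53-bit significand, ties to even)
def pvRoundDouble (q : ℚ) : ℚ :=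
  if q = 0 then 0
  else
    let e0 : ℤ := (Nat.log2 q.num.toNat : ℤ) - (Nat.log2 q.den : ℤ)
    let e : ℤ := if q < (2:ℚ) ^ e0 then e0 - 1 else e0
    let m := pvRhe (q * (2:ℚ) ^ ((52:ℤ) - e))
    (m : ℚ) * (2:ℚ) ^ (e - 52)

def pvToPercent (count total : ℤ) : String :=
  let q1 := pvRoundDouble ((count : ℚ) / (total : ℚ))
  let q2 := pvRoundDouble (q1 * 100)
  let n := pvRhe (q2 * 100)
  let frac := n % 100
  PySem.Int.toStr (n / 100) ++ "." ++ (if frac < 10 then "0" else "") ++ PySem.Int.toStr frac ++ "%"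

def calculate_age_distribution (ages : List Int) : List (String × String) :=
  let total : ℤ := (ages.length : ℤ)
  if total = 0 then []
  else
    let c1 := ages.foldl (fun s age => if age < 20 then s + 1 else s) (0 : ℤ)
    let c2 := ages.foldl (fun s age => if 20 ≤ age ∧ age ≤ 40 then s + 1 else s) (0 : ℤ)
    let c3 := ages.foldl (fun s age => if 40 < age ∧ age ≤ 60 then s + 1 else s) (0 : ℤ)
    let c4 := ages.foldl (fun s age => if 60 < age then s + 1 else s) (0 : ℤ)
    [("< 20", pvToPercent c1 total), ("20 to 40", pvToPercent c2 total),
     ("40 to 60", pvToPercent c3 total), ("> 60", pvToPercent c4 total)]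

-- ===== PORT B =====
def pvClassify (acc : ℤ × ℤ × ℤ × ℤ) (age : ℤ) : ℤ × ℤ × ℤ × ℤ :=
  match acc with
  | (a, b, c, d) =>
    if age < 20 then (a + 1, b, c, d)
    else if age ≤ 40 then (a, b + 1, c, d)
    else if age ≤ 60 then (a, b, c + 1, d)
    else (a, b, c, d + 1)

def calculate_age_distribution_alt (ages : List Int) : List (String × String) :=
  let total : ℤ := (ages.length : ℤ)
  if total = 0 then []
  else
    match ages.foldl pvClassify ((0 : ℤ), (0 : ℤ), (0 : ℤ), (0 : ℤ)) with
    | (a, b, c, d) =>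
      [("< 20", pvToPercent a total), ("20 to 40", pvToPercent b total),
       ("40 to 60", pvToPercent c total), ("> 60", pvToPercent d total)]

-- ===== PRECONDITION & SPEC =====
def Spec_calculate_age_distribution (ages : List Int) (out : List (String × String)) : Prop := out = calculate_age_distribution_alt ages
instance (ages : List Int) (out : List (String × String)) : Decidable (Spec_calculate_age_distribution ages out) := by unfold Spec_calculate_age_distribution; infer_instance

-- ===== CLAIM (what is proved, stated in full; the proofs are below) =====
def Claim_equal_calculate_age_distribution : Prop := ∀ (ages : List Int), Dom_calculate_age_distribution ages → Spec_calculate_age_distribution ages (calculate_age_distribution ages)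

-- ===== LEMMAS AND PROOFS =====
theorem pvClassify_foldl : ∀ (l : List ℤ) (a b c d : ℤ),
    l.foldl pvClassify (a, b, c, d) =
      (l.foldl (fun s age => if age < 20 then s + 1 else s) a,
       l.foldl (fun s age => if 20 ≤ age ∧ age ≤ 40 then s + 1 else s) b,
       l.foldl (fun s age => if 40 < age ∧ age ≤ 60 then s + 1 else s) c,
       l.foldl (fun s age => if 60 < age then s + 1 else s) d) := by
  intro l
  induction l with
  | nil => intro a b c d; rfl
  | cons x t ih =>
    intro a b c d
    simp only [List.foldl, pvClassify]
    by_cases h1 : x < 20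
    · rw [if_pos h1, if_pos h1, if_neg (by omega : ¬(20 ≤ x ∧ x ≤ 40)),
        if_neg (by omega : ¬(40 < x ∧ x ≤ 60)), if_neg (by omega : ¬(60 < x)), ih]
    · rw [if_neg h1, if_neg h1]
      by_cases h2 : x ≤ 40
      · rw [if_pos h2, if_pos (by omega : 20 ≤ x ∧ x ≤ 40),
          if_neg (by omega : ¬(40 < x ∧ x ≤ 60)), if_neg (by omega : ¬(60 < x)), ih]
      · rw [if_neg h2, if_neg (by omega : ¬(20 ≤ x ∧ x ≤ 40))]
        by_cases h3 : x ≤ 60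
        · rw [if_pos h3, if_pos (by omega : 40 < x ∧ x ≤ 60),
            if_neg (by omega : ¬(60 < x)), ih]
        · rw [if_neg h3, if_neg (by omega : ¬(40 < x ∧ x ≤ 60)),
            if_pos (by omega : 60 < x), ih]

-- ===== VERDICT (by name: the statement is the Claim_ definition above) =====
theorem calculate_age_distribution_spec : Claim_equal_calculate_age_distribution := by
  intro ages _
  unfold Spec_calculate_age_distribution calculate_age_distribution calculate_age_distribution_alt
  rw [pvClassify_foldl]
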